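-- pv_equiv track=rewrite | github.com/jacopo-j/advent-of-code-2017 | day16/code.py | part2
-- ===== SOURCE A (Python) =====
-- def part1(in_data, programs=None):
--     if not programs:
--         programs = [chr(c) for c in range(ord("a"), ord("q"))]
--     moves = in_data.split(",")
--     for move in moves:
--         if (move[0] == "s"):
--             sl = programs[-int(move[1:]):]
--             programs = sl + programs[:-int(move[1:])]
--         elif (move[0] == "x"):
--             a = int(move[1:].split("/")[0])
--             b = int(move[1:].split("/")[1])
--             programs[a], programs[b] = programs[b], programs[a]
--         elif (move[0] == "p"):
--             a = programs.index(move[1:].split("/")[0])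
--             b = programs.index(move[1:].split("/")[1])
--             programs[a], programs[b] = programs[b], programs[a]
--     return programs
--
-- def part2(in_data):
--     programs = [chr(c) for c in range(ord("a"), ord("q"))]
--     steps = ["".join(programs)]
--     for _ in range(0, 1000000000):
--         programs = part1(in_data, programs)
--         if ("".join(programs) in steps):
--             break
--         steps.append("".join(programs))
--     cycle_length = len(steps)
--     correct_pos = 1000000000 % cycle_length
--     return steps[correct_pos]
-- ===== SOURCE B (Python) =====
-- def part2(in_data):
--     # Compile the whole dance once into two permutations and raise them to the
--     # 1_000_000_000-th power by binary exponentiation instead of iterating dances.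
--     n = 16
--     sigma = list(range(n))   # position permutation: one dance moves state[sigma[i]] to slot i
--     rho = list(range(n))     # value renaming as an index permutation: value j becomes rho[j]
--     for move in in_data.split(","):
--         if move[0] == "s":
--             k = int(move[1:])
--             sigma = sigma[-k:] + sigma[:-k]
--         elif move[0] == "x":
--             a = int(move[1:].split("/")[0])
--             b = int(move[1:].split("/")[1])
--             sigma[a], sigma[b] = sigma[b], sigma[a]
--         elif move[0] == "p":
--             u = ord(move[1:].split("/")[0]) - 97
--             v = ord(move[1:].split("/")[1]) - 97
--             rho = [v if r == u else u if r == v else r for r in rho]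
--
--     def pmul(p, q):
--         # composite permutation: first look up through p, then through q
--         return [q[i] for i in p]
--
--     def ppow(p, m):
--         r = list(range(len(p)))
--         while m:
--             if m & 1:
--                 r = pmul(r, p)
--             p = pmul(p, p)
--             m >>= 1
--         return r
--
--     sp = ppow(sigma, 1000000000)
--     rp = ppow(rho, 1000000000)
--     return "".join(chr(97 + rp[sp[i]]) for i in range(n))
-- ===== Notes on version B (the rewrite author's own statement) =====
-- stated objective: alternative
-- what changed: Instead of re-parsing the move string and simulating every dance while collecting all intermediate strings until a repeat, B parses the moves once into a position permutation and a value-renaming permutation, raises both to the 1,000,000,000th power by binary exponentiation, and applies the combined result to the initial program order.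
import Mathlib
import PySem

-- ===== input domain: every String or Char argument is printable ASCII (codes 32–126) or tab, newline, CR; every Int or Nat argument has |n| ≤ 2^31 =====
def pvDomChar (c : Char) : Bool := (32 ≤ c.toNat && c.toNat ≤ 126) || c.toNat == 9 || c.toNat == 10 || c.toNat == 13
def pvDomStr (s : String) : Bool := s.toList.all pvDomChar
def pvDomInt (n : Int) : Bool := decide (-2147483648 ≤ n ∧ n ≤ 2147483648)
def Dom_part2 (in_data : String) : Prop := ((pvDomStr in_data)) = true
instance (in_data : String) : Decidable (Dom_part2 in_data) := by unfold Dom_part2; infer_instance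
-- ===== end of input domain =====

-- B parses the move list once into two permutations and raises them to the 1e9-th power by
-- binary exponentiation, instead of re-parsing and simulating every dance until a repeat (alternative algorithm).

-- ===== PORT A =====

-- programs = [chr(c) for c in range(ord("a"), ord("q"))]
def pvInitProgs : List (List Char) :=
  (PySem.List.pyRange 97 113 1).map (fun c => [Char.ofNat c.toNat])

-- one iteration of part1's move loop (the if/elif/elif chain)
def pvStepA (programs : List (List Char)) (move : List Char) : List (List Char) :=
  if PySem.List.pyGet? move 0 = some 's' then
    match PySem.Int.ofChars? (PySem.List.slice move (some 1) none) with
    | some n =>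
        PySem.List.slice programs (some (-n)) none ++ PySem.List.slice programs none (some (-n))
    | none => programs         -- int() raises ValueError: excluded by Pre_
  else if PySem.List.pyGet? move 0 = some 'x' then
    match (PySem.Chars.split? (PySem.List.slice move (some 1) none) ['/']).getD [] with
    | p0 :: p1 :: _ =>
      match PySem.Int.ofChars? p0, PySem.Int.ofChars? p1 with
      | some a, some b =>
          let vb := PySem.List.pyGetD programs b []
          let va := PySem.List.pyGetD programs a []
          PySem.List.pySetD (PySem.List.pySetD programs a vb) b va
      | _, _ => programs       -- ValueError / IndexError: excluded by Pre_
    | _ => programs            -- IndexError on split result: excluded by Pre_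
  else if PySem.List.pyGet? move 0 = some 'p' then
    match (PySem.Chars.split? (PySem.List.slice move (some 1) none) ['/']).getD [] with
    | p0 :: p1 :: _ =>
      match PySem.List.index? programs p0, PySem.List.index? programs p1 with
      | some a, some b =>
          let vb := PySem.List.pyGetD programs (b : Int) []
          let va := PySem.List.pyGetD programs (a : Int) []
          PySem.List.pySetD (PySem.List.pySetD programs (a : Int) vb) (b : Int) va
      | _, _ => programs       -- ValueError from .index: excluded by Pre_
    | _ => programs            -- IndexError: excluded by Pre_
  else programs                -- unrecognized move: Python falls through the elif chain

def pvPart1 (in_data : String) (programs : List (List Char)) : List (List Char) :=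
  ((PySem.Chars.split? in_data.toList [',']).getD []).foldl pvStepA
    (if programs.isEmpty then pvInitProgs else programs)

-- the 'for _ in range(0, 1000000000)' loop with its break; returns the final steps list
def pvLoopA (in_data : String) : Nat → List (List Char) → List (List Char) → List (List Char)
  | 0, _, steps => steps
  | fuel + 1, programs, steps =>
      let programs' := pvPart1 in_data programs
      let s := PySem.Chars.join [] programs'
      if s ∈ steps then steps
      else pvLoopA in_data fuel programs' (steps ++ [s])

def part2 (in_data : String) : String :=
  let programs := pvInitProgs
  let steps := pvLoopA in_data 1000000000 programs [PySem.Chars.join [] programs]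
  String.ofList
    (PySem.List.pyGetD steps (PySem.Int.mod 1000000000 (steps.length : Int)) [])

-- ===== PORT B =====

-- identity permutation list(range(16))
def pvIdP : List Int := PySem.List.pyRange 0 16 1

-- Source B's parse loop body: accumulate (sigma, rho) over one move token
def pvStepB (sr : List Int × List Int) (move : List Char) : List Int × List Int :=
  if PySem.List.pyGet? move 0 = some 's' then
    match PySem.Int.ofChars? (PySem.List.slice move (some 1) none) with
    | some k =>
        (PySem.List.slice sr.1 (some (-k)) none ++ PySem.List.slice sr.1 none (some (-k)), sr.2)
    | none => sr
  else if PySem.List.pyGet? move 0 = some 'x' then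
    match (PySem.Chars.split? (PySem.List.slice move (some 1) none) ['/']).getD [] with
    | p0 :: p1 :: _ =>
      match PySem.Int.ofChars? p0, PySem.Int.ofChars? p1 with
      | some a, some b =>
          let vb := PySem.List.pyGetD sr.1 b 0
          let va := PySem.List.pyGetD sr.1 a 0
          (PySem.List.pySetD (PySem.List.pySetD sr.1 a vb) b va, sr.2)
      | _, _ => sr
    | _ => sr
  else if PySem.List.pyGet? move 0 = some 'p' then
    match (PySem.Chars.split? (PySem.List.slice move (some 1) none) ['/']).getD [] with
    | p0 :: p1 :: _ =>
      match p0, p1 with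
      | [cu], [cv] =>          -- ord() needs a single character
          let u : Int := (cu.toNat : Int) - 97
          let v : Int := (cv.toNat : Int) - 97
          (sr.1, sr.2.map (fun r => if r = u then v else if r = v then u else r))
      | _, _ => sr
    | _ => sr
  else sr

-- composite permutation: first look up through p, then through q
def pvPmul (p q : List Int) : List Int := p.map (fun i => PySem.List.pyGetD q i 0)

-- binary exponentiation (Source B's while loop)
def pvPpowGo (p r : List Int) (m : Nat) : List Int :=
  if m = 0 then r
  else pvPpowGo (pvPmul p p) (if m % 2 = 1 then pvPmul r p else r) (m / 2)
termination_by m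
decreasing_by omega

def pvPpow (p : List Int) (m : Nat) : List Int :=
  pvPpowGo p (PySem.List.pyRange 0 (p.length : Int) 1) m

def part2_alt (in_data : String) : String :=
  let sr := ((PySem.Chars.split? in_data.toList [',']).getD []).foldl pvStepB (pvIdP, pvIdP)
  let sp := pvPpow sr.1 1000000000
  let rp := pvPpow sr.2 1000000000
  String.ofList ((PySem.List.pyRange 0 16 1).map (fun i =>
    Char.ofNat (97 + PySem.List.pyGetD rp (PySem.List.pyGetD sp i 0) 0).toNat))

-- ===== PRECONDITION & SPEC =====

-- the sixteen program names, as Python's single-character strings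
def pvLetters : List (List Char) :=
  [['a'],['b'],['c'],['d'],['e'],['f'],['g'],['h'],['i'],['j'],['k'],['l'],['m'],['n'],['o'],['p']]

-- a comma-separated token on which A's move dispatch returns (anything else makes A raise):
-- nonempty; 's' + a Python int; 'x' + two ints in [-16,16); 'p' + two names among a..p;
-- any other first character is silently skipped by A's elif chain.
def pvValidTok (t : List Char) : Bool :=
  match t with
  | [] => false
  | c :: rest =>
    if c = 's' then (PySem.Int.ofChars? rest).isSome
    else if c = 'x' then
      match (PySem.Chars.split? rest ['/']).getD [] with
      | p0 :: p1 :: _ =>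
        match PySem.Int.ofChars? p0, PySem.Int.ofChars? p1 with
        | some a, some b => decide (-16 ≤ a ∧ a < 16 ∧ -16 ≤ b ∧ b < 16)
        | _, _ => false
      | _ => false
    else if c = 'p' then
      match (PySem.Chars.split? rest ['/']).getD [] with
      | p0 :: p1 :: _ => decide (p0 ∈ pvLetters ∧ p1 ∈ pvLetters)
      | _ => false
    else true

-- Pre_ = exactly the inputs on which A's dance raises no exception (IndexError/ValueError)
def Pre_part2 (in_data : String) : Prop :=
  ∀ t ∈ (PySem.Chars.split? in_data.toList [',']).getD [], pvValidTok t = true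

instance (in_data : String) : Decidable (Pre_part2 in_data) := by
  unfold Pre_part2; infer_instance

def pvWitness_part2 : String := "s3,x13/2,pe/b,x-1/-14,s-2,deal with it"

def Spec_part2 (in_data : String) (out : String) : Prop := out = part2_alt in_data
instance (in_data : String) (out : String) : Decidable (Spec_part2 in_data out) := by
  unfold Spec_part2; infer_instance

-- ===== CLAIM (what is proved, stated in full; the proofs are below) =====
def Claim_equal_part2 : Prop :=
  ∀ (in_data : String), Dom_part2 in_data → Pre_part2 in_data → Spec_part2 in_data (part2 in_data)

-- ===== LEMMAS AND PROOFS =====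

-- a permutation stored as a 16-element lookup list
def pvBnd (l : List Int) : Prop := l.length = 16 ∧ ∀ x ∈ l, 0 ≤ x ∧ x < 16
def pvWf (l : List Int) : Prop := pvBnd l ∧ l.Nodup

theorem pvWf_idP : pvWf pvIdP := by
  constructor
  · constructor
    · decide
    · decide
  · decide

def pvChr (j : Int) : Char := Char.ofNat (97 + j).toNat
def pvEnc (l : List Int) : List (List Char) := l.map (fun j => [pvChr j])
def pvNorm (i : Int) : Nat := (if i < 0 then i + 16 else i).toNat

theorem pvNorm_lt {i : Int} (h1 : -16 ≤ i) (h2 : i < 16) : pvNorm i < 16 := by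
  unfold pvNorm; split <;> omega

theorem pvIdx_norm {i : Int} (h1 : -16 ≤ i) (h2 : i < 16) :
    PySem.List.pyIdx? 16 i = some (pvNorm i) := by
  unfold PySem.List.pyIdx? pvNorm
  by_cases h0 : 0 ≤ i
  · rw [if_pos h0, if_pos (by exact_mod_cast h2), if_neg (by omega)]
  · rw [if_neg h0, if_pos (by exact_mod_cast h1), if_pos (by omega)]
    congr 1
    omega

theorem pvGet_norm {α : Type} (l : List α) (h16 : l.length = 16) {i : Int}
    (h1 : -16 ≤ i) (h2 : i < 16) (d : α) :
    PySem.List.pyGetD l i d = l.getD (pvNorm i) d := by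
  unfold PySem.List.pyGetD PySem.List.pyGet?
  rw [h16, pvIdx_norm h1 h2]
  simp [List.getD_eq_getElem?_getD]

theorem pvSet_norm {α : Type} (l : List α) (h16 : l.length = 16) {i : Int}
    (h1 : -16 ≤ i) (h2 : i < 16) (v : α) :
    PySem.List.pySetD l i v = l.set (pvNorm i) v := by
  unfold PySem.List.pySetD PySem.List.pySet?
  rw [h16, pvIdx_norm h1 h2]
  rfl

theorem pvGetD_map' {α β : Type} (f : α → β) (l : List α) (h16 : l.length = 16) {i : Int}
    (h1 : -16 ≤ i) (h2 : i < 16) (d : β) (d' : α) :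
    PySem.List.pyGetD (l.map f) i d = f (PySem.List.pyGetD l i d') := by
  have hlt : pvNorm i < 16 := pvNorm_lt h1 h2
  rw [pvGet_norm (l.map f) (by simp [h16]) h1 h2, pvGet_norm l h16 h1 h2,
      List.getD_eq_getElem _ _ (by simp [h16]; omega), List.getD_eq_getElem _ _ (by omega),
      List.getElem_map]

theorem pvSetD_map {α β : Type} (f : α → β) (l : List α) (i : Int) (v : α) :
    PySem.List.pySetD (l.map f) i (f v) = (PySem.List.pySetD l i v).map f := by
  unfold PySem.List.pySetD PySem.List.pySet?
  rw [List.length_map]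
  cases h : PySem.List.pyIdx? l.length i <;> simp [List.map_set]

theorem pvSlice_map {α β : Type} (f : α → β) (l : List α) (a? b? : Option Int) :
    PySem.List.slice (l.map f) a? b? = (PySem.List.slice l a? b?).map f := by
  unfold PySem.List.slice
  cases a? <;> cases b? <;> simp [List.map_take, List.map_drop]

theorem pvJoin_flatten : ∀ ls : List (List Char), PySem.Chars.join [] ls = ls.flatten
  | [] => rfl
  | [a] => by simp [PySem.Chars.join, List.intercalate]
  | a :: b :: t => by
      have ih := pvJoin_flatten (b :: t)
      simp only [PySem.Chars.join, List.intercalate, List.intersperse] at *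
      simp_all

theorem pvJoin_singletons {α : Type} (f : α → Char) (l : List α) :
    PySem.Chars.join [] (l.map (fun j => [f j])) = l.map f := by
  rw [pvJoin_flatten]
  induction l with
  | nil => rfl
  | cons a t ih => simp_all

theorem pvChr_toNat {j : Int} (h1 : 0 ≤ j) (h2 : j < 16) : ((pvChr j).toNat : Int) = 97 + j := by
  unfold pvChr; interval_cases j <;> decide

theorem pvChr_inj {a b : Int} (ha1 : 0 ≤ a) (ha2 : a < 16) (hb1 : 0 ≤ b) (hb2 : b < 16)
    (h : pvChr a = pvChr b) : a = b := by
  have := congrArg Char.toNat h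
  have ha := pvChr_toNat ha1 ha2
  have hb := pvChr_toNat hb1 hb2
  omega

theorem pvIdP_getD {i : Int} (h1 : 0 ≤ i) (h2 : i < 16) : PySem.List.pyGetD pvIdP i 0 = i := by
  interval_cases i <;> decide


theorem pvBnd_pmul {p q : List Int} (hp : pvBnd p) (hq : pvBnd q) : pvBnd (pvPmul p q) := by
  constructor
  · simp [pvPmul, hp.1]
  · intro x hx
    simp only [pvPmul, List.mem_map] at hx
    obtain ⟨i, hi, rfl⟩ := hx
    refine hq.2 _ (PySem.List.pyGetD_mem q 0 ?_)
    have hb := hp.2 i hi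
    unfold PySem.Raise.InRange
    rw [hq.1]
    constructor <;> [omega; omega]

theorem pvPmul_assoc {a b : List Int} (ha : pvBnd a) (hb : pvBnd b) (c : List Int) :
    pvPmul (pvPmul a b) c = pvPmul a (pvPmul b c) := by
  unfold pvPmul
  rw [List.map_map]
  apply List.map_congr_left
  intro i hi
  have hbd := ha.2 i hi
  simp only [Function.comp_apply]
  exact (pvGetD_map' (fun j => PySem.List.pyGetD c j 0) b hb.1 (i := i) (by omega) (by omega) 0 0).symm

theorem pvPmul_id_right {r : List Int} (hr : pvBnd r) : pvPmul r pvIdP = r := by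
  unfold pvPmul
  have h : ∀ i ∈ r, PySem.List.pyGetD pvIdP i 0 = i :=
    fun i hi => pvIdP_getD (hr.2 i hi).1 (hr.2 i hi).2
  rw [List.map_congr_left h]
  simp

theorem pvPmul_id_left {p : List Int} (h16 : p.length = 16) : pvPmul pvIdP p = p := by
  unfold pvPmul pvIdP
  have h := PySem.List.map_pyGetD_pyRange_zero' p 0
  rw [h16] at h
  have hc : ((16 : Nat) : Int) = (16 : Int) := by norm_num
  rw [hc] at h
  exact h

theorem pvGetD_inj {q : List Int} (hq : pvWf q) {i j : Int} (hi1 : 0 ≤ i) (hi2 : i < 16)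
    (hj1 : 0 ≤ j) (hj2 : j < 16)
    (h : PySem.List.pyGetD q i 0 = PySem.List.pyGetD q j 0) : i = j := by
  rw [PySem.List.pyGetD_eq_getElem q 0 hi1 (by rw [hq.1.1]; exact_mod_cast hi2),
      PySem.List.pyGetD_eq_getElem q 0 hj1 (by rw [hq.1.1]; exact_mod_cast hj2)] at h
  have := (List.Nodup.getElem_inj_iff hq.2).mp h
  omega

theorem pvWf_pmul {p q : List Int} (hp : pvWf p) (hq : pvWf q) : pvWf (pvPmul p q) := by
  refine ⟨pvBnd_pmul hp.1 hq.1, ?_⟩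
  apply List.Nodup.map_on ?_ hp.2
  intro x hx y hy hf
  have hbx := hp.1.2 x hx
  have hby := hp.1.2 y hy
  exact pvGetD_inj hq hbx.1 hbx.2 hby.1 hby.2 hf

theorem pvWf_mem {l : List Int} (h : pvWf l) {v : Int} (h1 : 0 ≤ v) (h2 : v < 16) : v ∈ l := by
  have hsub : l.toFinset ⊆ Finset.Icc (0 : Int) 15 := by
    intro x hx
    rw [List.mem_toFinset] at hx
    have := h.1.2 x hx
    simp only [Finset.mem_Icc]
    omega
  have hcard : (Finset.Icc (0 : Int) 15).card ≤ l.toFinset.card := by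
    rw [List.toFinset_card_of_nodup h.2, h.1.1, Int.card_Icc]
    norm_num
  have heq := Finset.eq_of_subset_of_card_le hsub hcard
  have hv : v ∈ Finset.Icc (0 : Int) 15 := by
    simp only [Finset.mem_Icc]; omega
  rw [← heq, List.mem_toFinset] at hv
  exact hv

theorem pvTransp_inj (u v : Int) :
    Function.Injective (fun x : Int => if x = u then v else if x = v then u else x) := by
  intro x y h
  simp only at h
  split_ifs at h <;> omega

theorem pvSwap_eq_map {α : Type} [DecidableEq α] {l : List α} (hn : l.Nodup) {a b : Nat}
    (ha : a < l.length) (hb : b < l.length) (d : α) :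
    (l.set a (l.getD b d)).set b (l.getD a d)
      = l.map (fun x => if x = l[a] then l[b] else if x = l[b] then l[a] else x) := by
  rw [List.getD_eq_getElem _ _ ha, List.getD_eq_getElem _ _ hb]
  apply List.ext_getElem (by simp)
  intro j hj1 hj2
  have hj : j < l.length := by simpa using hj2
  rw [List.getElem_map]
  rw [List.getElem_set, List.getElem_set]
  by_cases h1 : b = j
  · subst h1
    rw [if_pos rfl]
    by_cases h2 : l[b] = l[a]
    · rw [if_pos h2]
      exact h2.symm
    · rw [if_neg h2, if_pos rfl]
  · rw [if_neg h1]
    by_cases h3 : a = j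
    · subst h3
      rw [if_pos rfl, if_pos rfl]
    · rw [if_neg h3]
      rw [if_neg (fun hc => h3 ((List.Nodup.getElem_inj_iff hn).mp hc).symm),
          if_neg (fun hc => h1 ((List.Nodup.getElem_inj_iff hn).mp hc).symm)]

def pvMpow (l : List Int) : Nat → List Int
  | 0 => pvIdP
  | m + 1 => pvPmul (pvMpow l m) l

theorem pvBnd_mpow {l : List Int} (h : pvBnd l) : ∀ m, pvBnd (pvMpow l m)
  | 0 => pvWf_idP.1
  | m + 1 => pvBnd_pmul (pvBnd_mpow h m) h

theorem pvMpow_comm {l : List Int} (h : pvBnd l) : ∀ m, pvPmul l (pvMpow l m) = pvPmul (pvMpow l m) l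
  | 0 => by
      show pvPmul l pvIdP = pvPmul pvIdP l
      rw [pvPmul_id_right h, pvPmul_id_left h.1]
  | m + 1 => by
      show pvPmul l (pvPmul (pvMpow l m) l) = pvPmul (pvPmul (pvMpow l m) l) l
      rw [← pvPmul_assoc h (pvBnd_mpow h m) l, pvMpow_comm h m]

theorem pvMpow_add {l : List Int} (h : pvBnd l) (a : Nat) :
    ∀ b, pvMpow l (a + b) = pvPmul (pvMpow l a) (pvMpow l b)
  | 0 => by
      show pvMpow l a = pvPmul (pvMpow l a) pvIdP
      rw [pvPmul_id_right (pvBnd_mpow h a)]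
  | b + 1 => by
      show pvPmul (pvMpow l (a + b)) l = pvPmul (pvMpow l a) (pvPmul (pvMpow l b) l)
      rw [pvMpow_add h a b, pvPmul_assoc (pvBnd_mpow h a) (pvBnd_mpow h b) l]

theorem pvMpow_double {l : List Int} (h : pvBnd l) : ∀ k, pvMpow (pvPmul l l) k = pvMpow l (2 * k)
  | 0 => rfl
  | k + 1 => by
      show pvPmul (pvMpow (pvPmul l l) k) (pvPmul l l) = pvMpow l (2 * (k + 1))
      rw [pvMpow_double h k, show 2 * (k + 1) = (2 * k + 1) + 1 by ring]
      show _ = pvPmul (pvPmul (pvMpow l (2 * k)) l) l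
      rw [← pvPmul_assoc (pvBnd_mpow h (2 * k)) h l]

theorem pvPpowGo_spec {p r : List Int} (hp : pvBnd p) (hr : pvBnd r) (m : Nat) :
    pvPpowGo p r m = pvPmul r (pvMpow p m) := by
  induction m using Nat.strong_induction_on generalizing p r with
  | _ m ih =>
    rw [pvPpowGo]
    split_ifs with h0 hodd
    · subst h0
      exact (pvPmul_id_right hr).symm
    · rw [ih (m / 2) (by omega) (pvBnd_pmul hp hp) (pvBnd_pmul hr hp), pvMpow_double hp]
      have hm : m = 2 * (m / 2) + 1 := by omega
      conv_rhs => rw [hm]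
      show _ = pvPmul r (pvPmul (pvMpow p (2 * (m / 2))) p)
      rw [pvPmul_assoc hr hp _, pvMpow_comm hp (2 * (m / 2))]
    · rw [ih (m / 2) (by omega) (pvBnd_pmul hp hp) hr, pvMpow_double hp]
      have hm : m = 2 * (m / 2) := by omega
      rw [← hm]

theorem pvPpow_spec {p : List Int} (hp : pvBnd p) (m : Nat) : pvPpow p m = pvMpow p m := by
  unfold pvPpow
  have hc : ((p.length : Nat) : Int) = (16 : Int) := by rw [hp.1]; norm_num
  rw [hc]
  show pvPpowGo p pvIdP m = _
  rw [pvPpowGo_spec hp pvWf_idP.1 m, pvPmul_id_left (pvBnd_mpow hp m).1]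

def pvToks (d : String) : List (List Char) := (PySem.Chars.split? d.toList [',']).getD []
def pvSR (d : String) : List Int × List Int := (pvToks d).foldl pvStepB (pvIdP, pvIdP)

theorem pvEncP (σ π ρ : List Int) :
    pvEnc (pvPmul (pvPmul σ π) ρ)
      = σ.map (fun i => [pvChr (PySem.List.pyGetD ρ (PySem.List.pyGetD π i 0) 0)]) := by
  unfold pvEnc pvPmul
  simp [List.map_map, Function.comp]

theorem pvRot_perm {α : Type} (l : List α) (j : Int) :
    (PySem.List.slice l (some j) none ++ PySem.List.slice l none (some j)).Perm l := by
  unfold PySem.List.slice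
  have h1 : List.take (l.length - PySem.List.clampIdx l.length j)
      (List.drop (PySem.List.clampIdx l.length j) l) = List.drop (PySem.List.clampIdx l.length j) l := by
    apply List.take_of_length_le
    simp
  have h2 : List.take (PySem.List.clampIdx l.length j - 0) (List.drop 0 l)
      = List.take (PySem.List.clampIdx l.length j) l := by simp
  rw [h1, h2]
  calc (List.drop (PySem.List.clampIdx l.length j) l ++ List.take (PySem.List.clampIdx l.length j) l).Perm
        (List.take (PySem.List.clampIdx l.length j) l ++ List.drop (PySem.List.clampIdx l.length j) l) :=
        List.perm_append_comm
    _ = l := List.take_append_drop _ l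

theorem pvWf_perm {l l' : List Int} (h : pvWf l) (hp : l'.Perm l) : pvWf l' := by
  refine ⟨⟨?_, ?_⟩, hp.nodup_iff.mpr h.2⟩
  · rw [hp.length_eq, h.1.1]
  · exact fun x hx => h.1.2 x (hp.subset hx)

theorem pvWf_swap {σ : List Int} (hσ : pvWf σ) {a b : Int} (ha1 : -16 ≤ a) (ha2 : a < 16)
    (hb1 : -16 ≤ b) (hb2 : b < 16) :
    pvWf (PySem.List.pySetD (PySem.List.pySetD σ a (PySem.List.pyGetD σ b 0)) b
      (PySem.List.pyGetD σ a 0)) := by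
  have h16 := hσ.1.1
  rw [pvGet_norm σ h16 hb1 hb2, pvGet_norm σ h16 ha1 ha2, pvSet_norm σ h16 ha1 ha2,
      pvSet_norm _ (by simp [h16]) hb1 hb2,
      pvSwap_eq_map hσ.2 (by rw [h16]; exact pvNorm_lt ha1 ha2)
        (by rw [h16]; exact pvNorm_lt hb1 hb2) 0]
  constructor
  · constructor
    · simp [h16]
    · intro x hx
      simp only [List.mem_map] at hx
      obtain ⟨y, hy, rfl⟩ := hx
      split_ifs
      · exact hσ.1.2 _ (List.getElem_mem _)
      · exact hσ.1.2 _ (List.getElem_mem _)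
      · exact hσ.1.2 y hy
  · exact List.Nodup.map (pvTransp_inj _ _) hσ.2

theorem pvLetters_spec {p : List Char} (h : p ∈ pvLetters) :
    ∃ j : Int, (0 ≤ j ∧ j < 16) ∧ p = [pvChr j] := by
  fin_cases h
  exacts [⟨0, by norm_num, by decide⟩, ⟨1, by norm_num, by decide⟩, ⟨2, by norm_num, by decide⟩,
    ⟨3, by norm_num, by decide⟩, ⟨4, by norm_num, by decide⟩, ⟨5, by norm_num, by decide⟩,
    ⟨6, by norm_num, by decide⟩, ⟨7, by norm_num, by decide⟩, ⟨8, by norm_num, by decide⟩,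
    ⟨9, by norm_num, by decide⟩, ⟨10, by norm_num, by decide⟩, ⟨11, by norm_num, by decide⟩,
    ⟨12, by norm_num, by decide⟩, ⟨13, by norm_num, by decide⟩, ⟨14, by norm_num, by decide⟩,
    ⟨15, by norm_num, by decide⟩]

theorem pvStep_corr (t : List Char) (hv : pvValidTok t = true) (σ ρ π : List Int)
    (hσ : pvWf σ) (hρ : pvWf ρ) (hπ : pvWf π) :
    pvStepA (pvEnc (pvPmul (pvPmul σ π) ρ)) t
        = pvEnc (pvPmul (pvPmul (pvStepB (σ, ρ) t).1 π) (pvStepB (σ, ρ) t).2)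
      ∧ pvWf (pvStepB (σ, ρ) t).1 ∧ pvWf (pvStepB (σ, ρ) t).2 := by
  cases t with
  | nil => simp [pvValidTok] at hv
  | cons c rest =>
    by_cases hs : c = 's'
    · subst hs
      simp only [pvValidTok, if_true] at hv
      obtain ⟨k, hk⟩ := Option.isSome_iff_exists.mp hv
      have hB : pvStepB (σ, ρ) ('s' :: rest)
          = (PySem.List.slice σ (some (-k)) none ++ PySem.List.slice σ none (some (-k)), ρ) := by
        unfold pvStepB
        rw [PySem.List.pyGet?_zero_cons, if_pos (show some 's' = some 's' from rfl),
          PySem.List.slice_from_one, List.tail_cons, hk]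
      have hA : pvStepA (pvEnc (pvPmul (pvPmul σ π) ρ)) ('s' :: rest)
          = PySem.List.slice (pvEnc (pvPmul (pvPmul σ π) ρ)) (some (-k)) none
            ++ PySem.List.slice (pvEnc (pvPmul (pvPmul σ π) ρ)) none (some (-k)) := by
        unfold pvStepA
        rw [PySem.List.pyGet?_zero_cons, if_pos (show some 's' = some 's' from rfl),
          PySem.List.slice_from_one, List.tail_cons, hk]
      rw [hA, hB]
      refine ⟨?_, pvWf_perm hσ (pvRot_perm σ (-k)), hρ⟩
      rw [pvEncP, pvEncP, pvSlice_map, pvSlice_map, ← List.map_append]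
    · by_cases hx : c = 'x'
      · subst hx
        simp only [pvValidTok, if_true] at hv
        cases hps : (PySem.Chars.split? rest ['/']).getD [] with
        | nil => rw [hps] at hv; exact absurd hv (by simp)
        | cons p0 ps' =>
          cases ps' with
          | nil => rw [hps] at hv; exact absurd hv (by simp)
          | cons p1 ps'' =>
            rw [hps] at hv
            dsimp only [] at hv
            cases ha : PySem.Int.ofChars? p0 with
            | none => rw [ha] at hv; exact absurd hv (by simp)
            | some a =>
              cases hb : PySem.Int.ofChars? p1 with
              | none => rw [ha, hb] at hv; simp at hv
              | some b =>
                rw [ha, hb] at hv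
                dsimp only [] at hv
                obtain ⟨ha1, ha2, hb1, hb2⟩ := of_decide_eq_true hv
                have hB : pvStepB (σ, ρ) ('x' :: rest)
                    = (PySem.List.pySetD (PySem.List.pySetD σ a (PySem.List.pyGetD σ b 0)) b
                        (PySem.List.pyGetD σ a 0), ρ) := by
                  unfold pvStepB
                  rw [PySem.List.pyGet?_zero_cons, if_neg (show ¬ some 'x' = some 's' by decide),
                    if_pos (show some 'x' = some 'x' from rfl), PySem.List.slice_from_one,
                    List.tail_cons, hps]
                  dsimp only []
                  rw [ha, hb]
                have hA : pvStepA (pvEnc (pvPmul (pvPmul σ π) ρ)) ('x' :: rest)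
                    = PySem.List.pySetD (PySem.List.pySetD (pvEnc (pvPmul (pvPmul σ π) ρ)) a
                        (PySem.List.pyGetD (pvEnc (pvPmul (pvPmul σ π) ρ)) b []))
                        b (PySem.List.pyGetD (pvEnc (pvPmul (pvPmul σ π) ρ)) a []) := by
                  unfold pvStepA
                  rw [PySem.List.pyGet?_zero_cons, if_neg (show ¬ some 'x' = some 's' by decide),
                    if_pos (show some 'x' = some 'x' from rfl), PySem.List.slice_from_one,
                    List.tail_cons, hps]
                  dsimp only []
                  rw [ha, hb]
                rw [hA, hB]
                refine ⟨?_, pvWf_swap hσ ha1 ha2 hb1 hb2, hρ⟩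
                rw [pvEncP, pvEncP]
                rw [pvGetD_map' _ σ hσ.1.1 hb1 hb2 [] 0, pvGetD_map' _ σ hσ.1.1 ha1 ha2 [] 0,
                  pvSetD_map, pvSetD_map]
      · by_cases hp : c = 'p'
        · subst hp
          simp only [pvValidTok, if_true] at hv
          cases hps : (PySem.Chars.split? rest ['/']).getD [] with
          | nil => rw [hps] at hv; exact absurd hv (by simp)
          | cons p0 ps' =>
            cases ps' with
            | nil => rw [hps] at hv; exact absurd hv (by simp)
            | cons p1 ps'' =>
              rw [hps] at hv
              dsimp only [] at hv
              obtain ⟨hm0, hm1⟩ := of_decide_eq_true hv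
              obtain ⟨u', ⟨hu1, hu2⟩, rfl⟩ := pvLetters_spec hm0
              obtain ⟨v', ⟨hv1, hv2⟩, rfl⟩ := pvLetters_spec hm1
              have hχ : pvWf (pvPmul (pvPmul σ π) ρ) := pvWf_pmul (pvWf_pmul hσ hπ) hρ
              have hEnodup : (pvEnc (pvPmul (pvPmul σ π) ρ)).Nodup := by
                unfold pvEnc
                apply List.Nodup.map_on ?_ hχ.2
                intro x hxm y hym hxy
                have hbx := hχ.1.2 x hxm
                have hby := hχ.1.2 y hym
                exact pvChr_inj hbx.1 hbx.2 hby.1 hby.2 (List.cons.inj hxy).1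
              have hmemu : [pvChr u'] ∈ pvEnc (pvPmul (pvPmul σ π) ρ) :=
                List.mem_map.mpr ⟨u', pvWf_mem hχ hu1 hu2, rfl⟩
              have hmemv : [pvChr v'] ∈ pvEnc (pvPmul (pvPmul σ π) ρ) :=
                List.mem_map.mpr ⟨v', pvWf_mem hχ hv1 hv2, rfl⟩
              obtain ⟨a, hia⟩ : ∃ a,
                  PySem.List.index? (pvEnc (pvPmul (pvPmul σ π) ρ)) [pvChr u'] = some a := by
                cases hi0 : PySem.List.index? (pvEnc (pvPmul (pvPmul σ π) ρ)) [pvChr u'] with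
                | none => exact absurd hmemu ((PySem.List.index?_eq_none_iff _ _).mp hi0)
                | some a => exact ⟨a, rfl⟩
              obtain ⟨b, hib⟩ : ∃ b,
                  PySem.List.index? (pvEnc (pvPmul (pvPmul σ π) ρ)) [pvChr v'] = some b := by
                cases hi0 : PySem.List.index? (pvEnc (pvPmul (pvPmul σ π) ρ)) [pvChr v'] with
                | none => exact absurd hmemv ((PySem.List.index?_eq_none_iff _ _).mp hi0)
                | some b => exact ⟨b, rfl⟩
              obtain ⟨haE, hEa, -⟩ := PySem.List.getElem_of_index?_eq_some hia
              obtain ⟨hbE, hEb, -⟩ := PySem.List.getElem_of_index?_eq_some hib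
              have hcu : ((pvChr u').toNat : Int) - 97 = u' := by
                have := pvChr_toNat hu1 hu2; omega
              have hcv : ((pvChr v').toNat : Int) - 97 = v' := by
                have := pvChr_toNat hv1 hv2; omega
              have hB : pvStepB (σ, ρ) ('p' :: rest)
                  = (σ, ρ.map (fun r => if r = ((pvChr u').toNat : Int) - 97
                      then ((pvChr v').toNat : Int) - 97
                      else if r = ((pvChr v').toNat : Int) - 97
                      then ((pvChr u').toNat : Int) - 97 else r)) := by
                unfold pvStepB
                rw [PySem.List.pyGet?_zero_cons, if_neg (show ¬ some 'p' = some 's' by decide),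
                  if_neg (show ¬ some 'p' = some 'x' by decide),
                  if_pos (show some 'p' = some 'p' from rfl),
                  PySem.List.slice_from_one, List.tail_cons, hps]
              have hA : pvStepA (pvEnc (pvPmul (pvPmul σ π) ρ)) ('p' :: rest)
                  = PySem.List.pySetD (PySem.List.pySetD (pvEnc (pvPmul (pvPmul σ π) ρ)) (a : Int)
                      (PySem.List.pyGetD (pvEnc (pvPmul (pvPmul σ π) ρ)) (b : Int) []))
                      (b : Int) (PySem.List.pyGetD (pvEnc (pvPmul (pvPmul σ π) ρ)) (a : Int) []) := by
                unfold pvStepA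
                rw [PySem.List.pyGet?_zero_cons, if_neg (show ¬ some 'p' = some 's' by decide),
                  if_neg (show ¬ some 'p' = some 'x' by decide),
                  if_pos (show some 'p' = some 'p' from rfl),
                  PySem.List.slice_from_one, List.tail_cons, hps]
                dsimp only []
                rw [hia, hib]
              rw [hA, hB]
              dsimp only []
              rw [hcu, hcv]
              refine ⟨?_, hσ, ?_⟩
              · simp only [PySem.List.pyGetD_natCast, PySem.List.pySetD_natCast]
                rw [pvSwap_eq_map hEnodup haE hbE [], hEa, hEb]
                rw [pvEncP, pvEncP, List.map_map]
                apply List.map_congr_left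
                intro i hi
                have hbi := hσ.1.2 i hi
                have hj : PySem.List.pyGetD π i 0 ∈ π := PySem.List.pyGetD_mem π 0
                  (by unfold PySem.Raise.InRange; rw [hπ.1.1]; constructor <;> omega)
                have hjb := hπ.1.2 _ hj
                simp only [Function.comp_apply]
                rw [pvGetD_map' (fun r => if r = u' then v' else if r = v' then u' else r) ρ
                  hρ.1.1 (i := PySem.List.pyGetD π i 0) (by omega) (by omega) 0 0]
                have hw : PySem.List.pyGetD ρ (PySem.List.pyGetD π i 0) 0 ∈ ρ :=
                  PySem.List.pyGetD_mem ρ 0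
                    (by unfold PySem.Raise.InRange; rw [hρ.1.1]; constructor <;> omega)
                have hwb := hρ.1.2 _ hw
                by_cases h1 : PySem.List.pyGetD ρ (PySem.List.pyGetD π i 0) 0 = u'
                · rw [h1]; simp
                · rw [if_neg (fun hc : _ = [pvChr u'] =>
                      h1 (pvChr_inj hwb.1 hwb.2 hu1 hu2 (List.cons.inj hc).1)), if_neg h1]
                  by_cases h2 : PySem.List.pyGetD ρ (PySem.List.pyGetD π i 0) 0 = v'
                  · rw [h2]; simp
                  · rw [if_neg (fun hc : _ = [pvChr v'] =>
                        h2 (pvChr_inj hwb.1 hwb.2 hv1 hv2 (List.cons.inj hc).1)), if_neg h2]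
              · refine ⟨⟨?_, ?_⟩, List.Nodup.map (pvTransp_inj _ _) hρ.2⟩
                · rw [List.length_map]; exact hρ.1.1
                · intro x hxm
                  simp only [List.mem_map] at hxm
                  obtain ⟨y, hy, rfl⟩ := hxm
                  have := hρ.1.2 y hy
                  split_ifs <;> omega
        · have hB : pvStepB (σ, ρ) (c :: rest) = (σ, ρ) := by
            unfold pvStepB
            rw [PySem.List.pyGet?_zero_cons,
              if_neg (show ¬ some c = some 's' by simp [hs]),
              if_neg (show ¬ some c = some 'x' by simp [hx]),
              if_neg (show ¬ some c = some 'p' by simp [hp])]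
          have hA : pvStepA (pvEnc (pvPmul (pvPmul σ π) ρ)) (c :: rest)
              = pvEnc (pvPmul (pvPmul σ π) ρ) := by
            unfold pvStepA
            rw [PySem.List.pyGet?_zero_cons,
              if_neg (show ¬ some c = some 's' by simp [hs]),
              if_neg (show ¬ some c = some 'x' by simp [hx]),
              if_neg (show ¬ some c = some 'p' by simp [hp])]
          rw [hA, hB]
          exact ⟨rfl, hσ, hρ⟩

def pvIter (d : String) : Nat → List Int
  | 0 => pvIdP
  | m + 1 => pvPmul (pvPmul (pvSR d).1 (pvIter d m)) (pvSR d).2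

def pvSOf (d : String) (m : Nat) : List Char := (pvIter d m).map pvChr

theorem pvFold_corr (ts : List (List Char)) (htv : ∀ t ∈ ts, pvValidTok t = true) :
    ∀ σ ρ π : List Int, pvWf σ → pvWf ρ → pvWf π →
    ts.foldl pvStepA (pvEnc (pvPmul (pvPmul σ π) ρ))
        = pvEnc (pvPmul (pvPmul (ts.foldl pvStepB (σ, ρ)).1 π) (ts.foldl pvStepB (σ, ρ)).2)
      ∧ pvWf (ts.foldl pvStepB (σ, ρ)).1 ∧ pvWf (ts.foldl pvStepB (σ, ρ)).2 := by
  induction ts with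
  | nil => intro σ ρ π hσ hρ hπ; exact ⟨rfl, hσ, hρ⟩
  | cons t ts ih =>
      intro σ ρ π hσ hρ hπ
      obtain ⟨he, h1, h2⟩ := pvStep_corr t (htv t (by simp)) σ ρ π hσ hρ hπ
      have hts : ∀ t' ∈ ts, pvValidTok t' = true := fun t' h => htv t' (by simp [h])
      simp only [List.foldl_cons]
      rw [he]
      exact ih hts _ _ π h1 h2 hπ

theorem pvSR_wf (d : String) (hpre : ∀ t ∈ pvToks d, pvValidTok t = true) :
    pvWf (pvSR d).1 ∧ pvWf (pvSR d).2 :=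
  (pvFold_corr (pvToks d) hpre pvIdP pvIdP pvIdP pvWf_idP pvWf_idP pvWf_idP).2

theorem pvIter_wf (d : String) (hpre : ∀ t ∈ pvToks d, pvValidTok t = true) :
    ∀ m, pvWf (pvIter d m)
  | 0 => pvWf_idP
  | m + 1 => pvWf_pmul (pvWf_pmul (pvSR_wf d hpre).1 (pvIter_wf d hpre m)) (pvSR_wf d hpre).2

theorem pvPart1_corr (d : String) (hpre : ∀ t ∈ pvToks d, pvValidTok t = true)
    (π : List Int) (hπ : pvWf π) :
    pvPart1 d (pvEnc π) = pvEnc (pvPmul (pvPmul (pvSR d).1 π) (pvSR d).2) := by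
  have hπne : π ≠ [] := by
    intro h0; rw [h0] at hπ; simpa using hπ.1.1
  have hne : (pvEnc π).isEmpty = false := by
    simp [pvEnc, hπne]
  unfold pvPart1
  rw [hne]
  simp only [Bool.false_eq_true, if_false]
  have hid : pvEnc π = pvEnc (pvPmul (pvPmul pvIdP π) pvIdP) := by
    rw [pvPmul_id_right (pvBnd_pmul pvWf_idP.1 hπ.1), pvPmul_id_left hπ.1.1]
  rw [hid]
  exact (pvFold_corr (pvToks d) hpre pvIdP pvIdP π pvWf_idP pvWf_idP hπ).1

theorem pvDance_inj (d : String) (hpre : ∀ t ∈ pvToks d, pvValidTok t = true)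
    {π π' : List Int} (hπ : pvWf π) (hπ' : pvWf π')
    (h : pvPmul (pvPmul (pvSR d).1 π) (pvSR d).2 = pvPmul (pvPmul (pvSR d).1 π') (pvSR d).2) :
    π = π' := by
  obtain ⟨hSw, hRw⟩ := pvSR_wf d hpre
  have hlen : (pvPmul (pvSR d).1 π).length = 16 := by simp [pvPmul, hSw.1.1]
  have hlen' : (pvPmul (pvSR d).1 π').length = 16 := by simp [pvPmul, hSw.1.1]
  have hstep1 : ∀ (j : Nat) (hj : j < 16),
      (pvPmul (pvSR d).1 π)[j]'(by omega) = (pvPmul (pvSR d).1 π')[j]'(by omega) := by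
    intro j hj
    have hjS : j < (pvSR d).1.length := by rw [hSw.1.1]; omega
    have hmap := congrArg (fun l => l[j]?) h
    simp only [pvPmul, List.getElem?_map, List.getElem?_eq_getElem hjS, Option.map_some,
      Option.some.injEq] at hmap
    have hsb := hSw.1.2 _ (List.getElem_mem hjS)
    have hm1 : PySem.List.pyGetD π ((pvSR d).1[j]) 0 ∈ π := PySem.List.pyGetD_mem π 0
      (by unfold PySem.Raise.InRange; rw [hπ.1.1]; constructor <;> omega)
    have hm2 : PySem.List.pyGetD π' ((pvSR d).1[j]) 0 ∈ π' := PySem.List.pyGetD_mem π' 0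
      (by unfold PySem.Raise.InRange; rw [hπ'.1.1]; constructor <;> omega)
    have hb1 := hπ.1.2 _ hm1
    have hb2 := hπ'.1.2 _ hm2
    simp only [pvPmul, List.getElem_map]
    exact pvGetD_inj hRw hb1.1 hb1.2 hb2.1 hb2.2 hmap
  have hstep2 : ∀ v : Int, 0 ≤ v → v < 16 →
      PySem.List.pyGetD π v 0 = PySem.List.pyGetD π' v 0 := by
    intro v hv1 hv2
    obtain ⟨j, hjl, hjv⟩ := List.getElem_of_mem (pvWf_mem hSw hv1 hv2)
    have hj16 : j < 16 := by rw [hSw.1.1] at hjl; exact hjl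
    have h1 := hstep1 j hj16
    simp only [pvPmul, List.getElem_map] at h1
    rw [hjv] at h1
    exact h1
  apply List.ext_getElem (by rw [hπ.1.1, hπ'.1.1])
  intro n h1 h2
  have hn16 : n < 16 := by rw [hπ.1.1] at h1; exact h1
  have := hstep2 (n : Int) (by omega) (by exact_mod_cast hn16)
  rw [PySem.List.pyGetD_eq_getElem π 0 (by omega) (by rw [hπ.1.1]; exact_mod_cast hn16),
      PySem.List.pyGetD_eq_getElem π' 0 (by omega) (by rw [hπ'.1.1]; exact_mod_cast hn16)] at this
  simpa using this

theorem pvIter_cancel (d : String) (hpre : ∀ t ∈ pvToks d, pvValidTok t = true) :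
    ∀ (k a b : Nat), pvIter d (a + k) = pvIter d (b + k) → pvIter d a = pvIter d b
  | 0, a, b, h => by simpa using h
  | k + 1, a, b, h => by
      apply pvIter_cancel d hpre k a b
      have h' : pvPmul (pvPmul (pvSR d).1 (pvIter d (a + k))) (pvSR d).2
          = pvPmul (pvPmul (pvSR d).1 (pvIter d (b + k))) (pvSR d).2 := h
      exact pvDance_inj d hpre (pvIter_wf d hpre _) (pvIter_wf d hpre _) h'

theorem pvIter_period (d : String) {q : Nat} (hq : pvIter d q = pvIdP) :
    ∀ a, pvIter d (a + q) = pvIter d a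
  | 0 => by simpa using hq
  | a + 1 => by
      rw [show a + 1 + q = (a + q) + 1 from by omega]
      show pvPmul (pvPmul (pvSR d).1 (pvIter d (a + q))) (pvSR d).2 = _
      rw [pvIter_period d hq a]
      rfl

theorem pvIter_mod (d : String) {q : Nat} (hq : pvIter d q = pvIdP) (r : Nat) :
    ∀ c, pvIter d (r + c * q) = pvIter d r
  | 0 => by simp
  | c + 1 => by
      rw [show r + (c + 1) * q = (r + c * q) + q from by ring, pvIter_period d hq _,
        pvIter_mod d hq r c]

theorem pvSOf_inj (d : String) (hpre : ∀ t ∈ pvToks d, pvValidTok t = true) {i j : Nat}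
    (h : pvSOf d i = pvSOf d j) : pvIter d i = pvIter d j := by
  have hi := pvIter_wf d hpre i
  have hjw := pvIter_wf d hpre j
  apply List.ext_getElem (by rw [hi.1.1, hjw.1.1])
  intro n h1 h2
  have hmap := congrArg (fun l => l[n]?) h
  simp only [pvSOf, List.getElem?_map] at hmap
  rw [List.getElem?_eq_getElem h1, List.getElem?_eq_getElem h2] at hmap
  simp only [Option.map_some, Option.some.injEq] at hmap
  have hb1 := hi.1.2 _ (List.getElem_mem h1)
  have hb2 := hjw.1.2 _ (List.getElem_mem h2)
  exact pvChr_inj hb1.1 hb1.2 hb2.1 hb2.2 hmap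

theorem pvLoop_spec (d : String) (hpre : ∀ t ∈ pvToks d, pvValidTok t = true) :
    ∀ (fuel m : Nat), (∀ k, 0 < k → k ≤ m → pvIter d k ≠ pvIdP) →
    ∃ q, m + 1 ≤ q ∧ q ≤ m + fuel + 1 ∧
      pvLoopA d fuel (pvEnc (pvIter d m)) ((List.range (m + 1)).map (pvSOf d)) =
        (List.range q).map (pvSOf d) ∧
      (∀ k, 0 < k → k ≤ q - 1 → pvIter d k ≠ pvIdP) ∧
      (pvIter d q = pvIdP ∨ q = m + fuel + 1) := by
  intro fuel
  induction fuel with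
  | zero =>
      intro m hnr
      exact ⟨m + 1, le_refl _, by omega, rfl, by simpa using hnr, Or.inr (by omega)⟩
  | succ fuel ih =>
      intro m hnr
      rw [pvLoopA]
      have hp1 : pvPart1 d (pvEnc (pvIter d m)) = pvEnc (pvIter d (m + 1)) :=
        pvPart1_corr d hpre _ (pvIter_wf d hpre m)
      rw [hp1]
      have hjoin : PySem.Chars.join [] (pvEnc (pvIter d (m + 1))) = pvSOf d (m + 1) :=
        pvJoin_singletons pvChr (pvIter d (m + 1))
      rw [hjoin]
      by_cases hmem : pvSOf d (m + 1) ∈ (List.range (m + 1)).map (pvSOf d)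
      · have hret : pvIter d (m + 1) = pvIdP := by
          obtain ⟨i, hi, heq⟩ := List.mem_map.mp hmem
          rw [List.mem_range] at hi
          have he2 := pvSOf_inj d hpre heq
          rcases Nat.eq_zero_or_pos i with rfl | hip
          · exact he2.symm
          · exfalso
            have hc := pvIter_cancel d hpre i (m + 1 - i) 0 (by
              rw [show m + 1 - i + i = m + 1 from by omega, show 0 + i = i from by omega]
              exact he2.symm)
            exact hnr (m + 1 - i) (by omega) (by omega) hc
        rw [if_pos hmem]
        exact ⟨m + 1, le_refl _, by omega, rfl, by simpa using hnr, Or.inl hret⟩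
      · rw [if_neg hmem]
        have hsteps : (List.range (m + 1)).map (pvSOf d) ++ [pvSOf d (m + 1)]
            = (List.range (m + 2)).map (pvSOf d) := by
          rw [show m + 2 = (m + 1) + 1 from rfl, List.range_succ (n := m + 1), List.map_append]
          simp
        rw [hsteps]
        have hnr' : ∀ k, 0 < k → k ≤ m + 1 → pvIter d k ≠ pvIdP := by
          intro k hk1 hk2
          rcases Nat.lt_or_ge k (m + 1) with hlt | hge
          · exact hnr k hk1 (by omega)
          · have hk : k = m + 1 := by omega
            subst hk
            intro hbad
            apply hmem
            have hss : pvSOf d (m + 1) = pvSOf d 0 := by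
              unfold pvSOf
              rw [hbad]
              rfl
            rw [hss]
            exact List.mem_map.mpr ⟨0, by simp, rfl⟩
        obtain ⟨q, hq1, hq2, hq3, hq4, hq5⟩ := ih (m + 1) hnr'
        refine ⟨q, by omega, by omega, hq3, hq4, ?_⟩
        rcases hq5 with h5 | h5
        · exact Or.inl h5
        · exact Or.inr (by omega)

theorem pvIter_closed (d : String) (hpre : ∀ t ∈ pvToks d, pvValidTok t = true) :
    ∀ m, pvIter d m = pvPmul (pvMpow (pvSR d).1 m) (pvMpow (pvSR d).2 m)
  | 0 => by
      show pvIdP = pvPmul pvIdP pvIdP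
      rw [pvPmul_id_right pvWf_idP.1]
  | m + 1 => by
      obtain ⟨hSw, hRw⟩ := pvSR_wf d hpre
      show pvPmul (pvPmul (pvSR d).1 (pvIter d m)) (pvSR d).2 = _
      rw [pvIter_closed d hpre m,
        ← pvPmul_assoc hSw.1 (pvBnd_mpow hSw.1 m) (pvMpow (pvSR d).2 m),
        pvMpow_comm hSw.1 m,
        pvPmul_assoc (pvBnd_pmul (pvBnd_mpow hSw.1 m) hSw.1) (pvBnd_mpow hRw.1 m) (pvSR d).2]
      rfl

theorem part2_eq (d : String) (hpre : Pre_part2 d) : part2 d = part2_alt d := by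
  have hpre' : ∀ t ∈ pvToks d, pvValidTok t = true := fun t ht => hpre t ht
  obtain ⟨hSw, hRw⟩ := pvSR_wf d hpre'
  have h0 : pvInitProgs = pvEnc pvIdP := by decide
  obtain ⟨q, hq1, hq2, hq3, hq4, hq5⟩ :=
    pvLoop_spec d hpre' 1000000000 0 (by intro k hk1 hk2; omega)
  have hqpos : 0 < q := by omega
  -- the A side computes pvSOf d (1000000000 % q)
  have hsteps0 : [PySem.Chars.join [] (pvEnc pvIdP)] = (List.range (0 + 1)).map (pvSOf d) := by
    unfold pvEnc
    rw [pvJoin_singletons pvChr pvIdP]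
    rfl
  have hA : part2 d = String.ofList (pvSOf d (1000000000 % q)) := by
    unfold part2
    dsimp only []
    rw [h0, hsteps0]
    have h00 : pvEnc pvIdP = pvEnc (pvIter d 0) := rfl
    rw [h00, hq3]
    have hlen : (((List.range q).map (pvSOf d)).length : Int) = ((q : Nat) : Int) := by simp
    rw [hlen]
    have hmod : PySem.Int.mod 1000000000 ((q : Nat) : Int)
        = ((1000000000 % q : Nat) : Int) := by
      have := PySem.Int.mod_natCast 1000000000 q
      rw [show (((1000000000 : Nat) : Int)) = (1000000000 : Int) from by norm_num] at this
      exact this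
    rw [hmod, PySem.List.pyGetD_natCast]
    have hlt : 1000000000 % q < ((List.range q).map (pvSOf d)).length := by
      simpa using Nat.mod_lt 1000000000 hqpos
    rw [List.getD_eq_getElem _ _ hlt]
    simp
  have hmodN : pvSOf d (1000000000 % q) = pvSOf d 1000000000 := by
    rcases hq5 with hper | hlast
    · unfold pvSOf
      have hIm := pvIter_mod d hper (1000000000 % q) (1000000000 / q)
      rw [Nat.mod_add_div' 1000000000 q] at hIm
      rw [hIm]
    · rw [hlast]
  -- the B side
  have hB : part2_alt d = String.ofList (pvSOf d 1000000000) := by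
    unfold part2_alt
    dsimp only []
    have hsr : ((PySem.Chars.split? d.toList [',']).getD []).foldl pvStepB (pvIdP, pvIdP)
        = pvSR d := rfl
    rw [hsr, pvPpow_spec hSw.1 1000000000, pvPpow_spec hRw.1 1000000000]
    have hsplen : (((pvMpow (pvSR d).1 1000000000).length : Nat) : Int) = (16 : Int) := by
      rw [(pvBnd_mpow hSw.1 1000000000).1]; norm_num
    rw [show (16 : Int) = (((pvMpow (pvSR d).1 1000000000).length : Nat) : Int) from hsplen.symm]
    have hcomp : (fun i => Char.ofNat (97 + PySem.List.pyGetD (pvMpow (pvSR d).2 1000000000) (PySem.List.pyGetD (pvMpow (pvSR d).1 1000000000) i 0) 0).toNat)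
        = (fun x => pvChr (PySem.List.pyGetD (pvMpow (pvSR d).2 1000000000) x 0))
          ∘ (fun i => PySem.List.pyGetD (pvMpow (pvSR d).1 1000000000) i 0) := rfl
    rw [hcomp, ← List.map_map, PySem.List.map_pyGetD_pyRange_zero']
    unfold pvSOf
    rw [pvIter_closed d hpre' 1000000000]
    unfold pvPmul
    rw [List.map_map]
    rfl
  rw [hA, hmodN, hB]

-- ===== VERDICT (by name: the statement is the Claim_ definition above) =====
theorem part2_spec : Claim_equal_part2 := by
  intro d hdom hpre
  exact part2_eq d hpre
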